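-- pv_equiv track=rewrite | github.com/Paulitoooo/Lyc-e | nsi/Terminale/s13.py | forceBrute
-- ===== SOURCE A (Python) =====
-- def codeBin(n,nb):
--     T=[0 for i in range(nb)]
--     c=-1
--     for i in range(nb):
--         d=n%2
--         n=n//2
--         T[c]=d
--         c=c-1
--
--     return T
--
-- def brutus(n):
--     return [codeBin(i,n) for i in range(2**n)]
--
-- def forceBrute(L):
--     L2 = brutus(len(L))
--     for i in L2:
--         p=0
--         m=0
--         for j in range(len(i)):
--             if i[j]==1:
--                 m=m+L[j][0]
--                 p=p+L[j][1]
--         i.append(m)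
--         i.append(p)
--     return L2
-- ===== SOURCE B (Python) =====
-- def forceBrute(L):
--     def rec(rest, prefix, m, p):
--         if not rest:
--             return [prefix + [m, p]]
--         first = rest[0]
--         tail = rest[1:]
--         return (rec(tail, prefix + [0], m, p)
--                 + rec(tail, prefix + [1], m + first[0], p + first[1]))
--     return rec(L, [], 0, 0)
-- ===== Notes on version B (the rewrite author's own statement) =====
-- stated objective: alternative
-- what changed: Replaced the two-phase build-the-full-binary-table (codeBin per index) then re-scan-each-row-to-sum with a single recursive enumeration that threads the weight/value sums incrementally while building each bit prefix.
import Mathlib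
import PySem

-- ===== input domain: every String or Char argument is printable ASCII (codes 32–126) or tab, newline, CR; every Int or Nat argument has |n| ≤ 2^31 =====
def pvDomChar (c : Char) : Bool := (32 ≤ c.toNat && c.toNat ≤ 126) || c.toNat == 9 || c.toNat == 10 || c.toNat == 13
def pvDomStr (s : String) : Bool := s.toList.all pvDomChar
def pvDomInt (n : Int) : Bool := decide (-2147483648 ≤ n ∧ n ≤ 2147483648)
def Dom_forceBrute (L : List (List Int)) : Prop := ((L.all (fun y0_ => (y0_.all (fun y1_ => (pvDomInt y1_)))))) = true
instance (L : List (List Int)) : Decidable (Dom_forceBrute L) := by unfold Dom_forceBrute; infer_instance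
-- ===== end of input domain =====

-- B replaces A's build-full-binary-table-then-rescan-each-row with one recursive
-- enumeration that threads the two sums incrementally (alternative decomposition).

-- ===== PORT A =====
-- codeBin(n, nb): table of nb zeros, filled from the back (negative index c) with n's bits
def forceBrute_codeBin (n : Int) (nb : Nat) : List Int :=
  (List.range nb).foldl
    (fun (st : Int × List Int × Int) _ =>
      let d := PySem.Int.mod st.1 2
      let n' := PySem.Int.floordiv st.1 2
      let T' := PySem.List.pySetD st.2.1 st.2.2 d
      (n', T', st.2.2 - 1))
    (n, List.replicate nb (0 : Int), (-1 : Int))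
  |>.2.1

-- brutus(n) = [codeBin(i, n) for i in range(2**n)]
def forceBrute_brutus (n : Nat) : List (List Int) :=
  (PySem.List.pyRange 0 ((2 : Int) ^ n) 1).map (fun i => forceBrute_codeBin i n)

def forceBrute (L : List (List Int)) : List (List Int) :=
  (forceBrute_brutus L.length).map (fun i =>
    let mp := (List.range i.length).foldl
      (fun (st : Int × Int) (j : Nat) =>
        if PySem.List.pyGetD i (j : Int) 0 == 1 then
          (st.1 + PySem.List.pyGetD (PySem.List.pyGetD L (j : Int) []) 0 0,
           st.2 + PySem.List.pyGetD (PySem.List.pyGetD L (j : Int) []) 1 0)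
        else st)
      ((0 : Int), (0 : Int))
    i ++ [mp.1, mp.2])

-- ===== PORT B =====
def forceBrute_rec (rest : List (List Int)) (pre : List Int) (m p : Int) : List (List Int) :=
  match rest with
  | [] => [pre ++ [m, p]]
  | first :: tail =>
      forceBrute_rec tail (pre ++ [0]) m p ++
      forceBrute_rec tail (pre ++ [1])
        (m + PySem.List.pyGetD first 0 0) (p + PySem.List.pyGetD first 1 0)

def forceBrute_alt (L : List (List Int)) : List (List Int) :=
  forceBrute_rec L [] 0 0

-- ===== PRECONDITION & SPEC =====
-- Python A (and B alike) raises IndexError when some inner list has fewer than 2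
-- entries (it reads L[j][0] and L[j][1]); Pre_ excludes exactly those inputs.
def Pre_forceBrute (L : List (List Int)) : Prop := ∀ r ∈ L, 2 ≤ r.length
instance (L : List (List Int)) : Decidable (Pre_forceBrute L) := by unfold Pre_forceBrute; infer_instance
def pvWitness_forceBrute : List (List Int) := [[1, 2], [3, 4]]

def Spec_forceBrute (L : List (List Int)) (out : List (List Int)) : Prop := out = forceBrute_alt L
instance (L : List (List Int)) (out : List (List Int)) : Decidable (Spec_forceBrute L out) := by unfold Spec_forceBrute; infer_instance

-- ===== CLAIM (what is proved, stated in full; the proofs are below) =====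
def Claim_equal_forceBrute : Prop := ∀ (L : List (List Int)), Dom_forceBrute L → Pre_forceBrute L → Spec_forceBrute L (forceBrute L)

-- ===== LEMMAS AND PROOFS =====

theorem pySetD_neg (xs : List Int) (k : Nat) (v : Int) (h : k < xs.length) :
    PySem.List.pySetD xs (-1 - (k : Int)) v = xs.set (xs.length - 1 - k) v := by
  have hi : PySem.List.pyIdx? xs.length (-1 - (k : Int)) = some (xs.length - 1 - k) := by
    simp [PySem.List.pyIdx?]
    split_ifs <;> first | (exfalso; omega) | (congr 1; omega)
  simp [PySem.List.pySetD, PySem.List.pySet?, hi]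

-- bits of i in width n, LSB peeled and appended at the right (so MSB first)
def pvBitsL : Nat → Int → List Int
  | 0, _ => []
  | n + 1, i => pvBitsL n (PySem.Int.floordiv i 2) ++ [PySem.Int.mod i 2]

theorem pvBitsL_succ (n : Nat) (i : Int) :
    pvBitsL (n + 1) i = pvBitsL n (i / 2) ++ [i % 2] := by
  rw [pvBitsL, PySem.Int.floordiv_eq_ediv_of_pos (by norm_num),
      PySem.Int.mod_eq_emod_of_pos (by norm_num)]

theorem pvBitsL_length (n : Nat) (i : Int) : (pvBitsL n i).length = n := by
  induction n generalizing i with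
  | zero => rfl
  | succ n ih => rw [pvBitsL_succ]; simp [ih]

theorem pvBitsL_msb0 (n : Nat) (i : Int) (h0 : 0 ≤ i) (h1 : i < 2 ^ n) :
    pvBitsL (n + 1) i = 0 :: pvBitsL n i := by
  induction n generalizing i with
  | zero =>
    have : i = 0 := by omega
    subst this; decide
  | succ n ih =>
    have hp : ((2 : Int) ^ (n + 1)) = 2 * 2 ^ n := by ring
    rw [pvBitsL_succ, ih (i / 2) (by omega) (by omega), pvBitsL_succ]
    simp

theorem pvBitsL_msb1 (n : Nat) (i : Int) (h0 : 0 ≤ i) (h1 : i < 2 ^ n) :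
    pvBitsL (n + 1) (2 ^ n + i) = 1 :: pvBitsL n i := by
  induction n generalizing i with
  | zero =>
    have : i = 0 := by omega
    subst this; decide
  | succ n ih =>
    have hp : ((2 : Int) ^ (n + 1)) = 2 * 2 ^ n := by ring
    have hd : (2 ^ (n + 1) + i) / 2 = 2 ^ n + i / 2 := by omega
    have hm : (2 ^ (n + 1) + i) % 2 = i % 2 := by omega
    rw [pvBitsL_succ, hd, hm, ih (i / 2) (by omega) (by omega), pvBitsL_succ]
    simp

-- iterated n // 2
def pvItn : Nat → Int → Int
  | 0, i => i
  | k + 1, i => pvItn k (PySem.Int.floordiv i 2)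

theorem pvItn_succ_top (k : Nat) (i : Int) :
    pvItn (k + 1) i = PySem.Int.floordiv (pvItn k i) 2 := by
  induction k generalizing i with
  | zero => rfl
  | succ k ih => rw [pvItn, ih, pvItn]

theorem pvBitsL_cons (k : Nat) (i : Int) :
    pvBitsL (k + 1) i = PySem.Int.mod (pvItn k i) 2 :: pvBitsL k i := by
  induction k generalizing i with
  | zero => rfl
  | succ k ih =>
    rw [pvBitsL, ih (PySem.Int.floordiv i 2)]
    rw [show pvBitsL (k + 1) i = pvBitsL k (PySem.Int.floordiv i 2) ++ [PySem.Int.mod i 2] from rfl]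
    simp [pvItn]

theorem pv_set_mid (a : Nat) (s : List Int) (d : Int) :
    (List.replicate (a + 1) (0 : Int) ++ s).set a d = List.replicate a (0 : Int) ++ d :: s := by
  rw [List.replicate_succ' (n := a), List.append_assoc]
  rw [List.set_append_right _ _ (by simp)]
  simp

theorem pv_codeBin_inv (nb : Nat) (n : Int) (k : Nat) (hk : k ≤ nb) :
    (List.range k).foldl
      (fun (st : Int × List Int × Int) _ =>
        let d := PySem.Int.mod st.1 2
        let n' := PySem.Int.floordiv st.1 2
        let T' := PySem.List.pySetD st.2.1 st.2.2 d
        (n', T', st.2.2 - 1))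
      (n, List.replicate nb (0 : Int), (-1 : Int))
    = (pvItn k n, List.replicate (nb - k) (0 : Int) ++ pvBitsL k n, -1 - (k : Int)) := by
  induction k with
  | zero => simp [pvItn, pvBitsL]
  | succ k ih =>
    rw [List.range_succ, List.foldl_append, ih (by omega)]
    simp only [List.foldl_cons, List.foldl_nil]
    refine Prod.ext ?_ (Prod.ext ?_ ?_)
    · exact (pvItn_succ_top k n).symm
    · obtain ⟨a, ha⟩ : ∃ a, nb - k = a + 1 := ⟨nb - k - 1, by omega⟩
      have hlen : (List.replicate (nb - k) (0 : Int) ++ pvBitsL k n).length = nb := by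
        simp [pvBitsL_length]; omega
      show PySem.List.pySetD (List.replicate (nb - k) (0 : Int) ++ pvBitsL k n) (-1 - (k : Int))
        (PySem.Int.mod (pvItn k n) 2) = List.replicate (nb - (k + 1)) (0 : Int) ++ pvBitsL (k + 1) n
      rw [pySetD_neg _ k _ (by omega), hlen, ha,
          show nb - 1 - k = a by omega, show nb - (k + 1) = a by omega,
          pv_set_mid, pvBitsL_cons]
    · show (-1 - (k : Int)) - 1 = -1 - ((k : Nat) + 1 : Nat)
      push_cast; ring

theorem pv_codeBin_eq (n : Int) (nb : Nat) :
    forceBrute_codeBin n nb = pvBitsL nb n := by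
  rw [forceBrute_codeBin, pv_codeBin_inv nb n nb le_rfl]
  simp

-- structural (m, p) sums of a 0/1 row against L
def pvSums : List (List Int) → List Int → Int × Int
  | _, [] => (0, 0)
  | L, b :: r =>
      let rest := pvSums L.tail r
      if b == 1 then
        (PySem.List.pyGetD L.headI 0 0 + rest.1, PySem.List.pyGetD L.headI 1 0 + rest.2)
      else rest

theorem pv_pyGetD_succ {α : Type} [Inhabited α] (L : List α) (j : Nat) (d : α) :
    PySem.List.pyGetD L (((j + 1 : Nat) : Int)) d = PySem.List.pyGetD L.tail ((j : Nat) : Int) d := by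
  rw [PySem.List.pyGetD_natCast, PySem.List.pyGetD_natCast]
  cases L <;> simp

theorem pv_pyGetD_zero_head (L : List (List Int)) :
    PySem.List.pyGetD L (0 : Int) [] = L.headI := by
  rw [PySem.List.pyGetD_zero]
  cases L <;> rfl

theorem pv_fold_sums (row : List Int) (L : List (List Int)) (m p : Int) :
    (List.range row.length).foldl
      (fun (st : Int × Int) (j : Nat) =>
        if PySem.List.pyGetD row (j : Int) 0 == 1 then
          (st.1 + PySem.List.pyGetD (PySem.List.pyGetD L (j : Int) []) 0 0,
           st.2 + PySem.List.pyGetD (PySem.List.pyGetD L (j : Int) []) 1 0)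
        else st) (m, p)
    = (m + (pvSums L row).1, p + (pvSums L row).2) := by
  induction row generalizing L m p with
  | nil => simp [pvSums]
  | cons b r ih =>
    rw [List.length_cons, List.range_succ_eq_map, List.foldl_cons, List.foldl_map]
    simp only [pv_pyGetD_succ, List.tail_cons, Nat.cast_zero, PySem.List.pyGetD_zero_cons, pv_pyGetD_zero_head]
    by_cases hb : b = 1
    · subst hb
      simp only [BEq.rfl, if_pos]
      rw [ih L.tail]
      simp only [pvSums, BEq.rfl, if_pos]
      exact Prod.ext (by ring) (by ring)
    · have hbne : (b == 1) = false := by simp [hb]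
      rw [if_neg (by simp [hb])]
      rw [ih L.tail]
      simp [pvSums, hbne]

theorem pv_rec_eq (L : List (List Int)) : ∀ (pre : List Int) (m p : Int),
    forceBrute_rec L pre m p =
      (List.range (2 ^ L.length)).map (fun k =>
        pre ++ pvBitsL L.length ((k : Nat) : Int) ++
          [m + (pvSums L (pvBitsL L.length ((k : Nat) : Int))).1,
           p + (pvSums L (pvBitsL L.length ((k : Nat) : Int))).2]) := by
  induction L with
  | nil =>
    intro pre m p
    simp [forceBrute_rec, pvBitsL, pvSums]
  | cons x tl ih =>
    intro pre m p
    rw [forceBrute_rec, ih, ih]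
    have h2 : 2 ^ (x :: tl).length = 2 ^ tl.length + 2 ^ tl.length := by
      rw [List.length_cons, pow_succ]; omega
    rw [h2, List.range_add, List.map_append, List.map_map]
    congr 1
    · apply List.map_congr_left
      intro k hk
      have hk' : ((k : Nat) : Int) < 2 ^ tl.length := by
        rw [List.mem_range] at hk
        exact_mod_cast hk
      rw [List.length_cons, pvBitsL_msb0 tl.length _ (by positivity) hk']
      simp [pvSums, List.append_assoc]
    · apply List.map_congr_left
      intro k hk
      have hk' : ((k : Nat) : Int) < 2 ^ tl.length := by
        rw [List.mem_range] at hk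
        exact_mod_cast hk
      have hcast : ((2 ^ tl.length + k : Nat) : Int) = 2 ^ tl.length + (k : Int) := by
        push_cast; ring
      simp only [Function.comp_apply, List.length_cons, hcast]
      rw [pvBitsL_msb1 tl.length _ (by positivity) hk']
      simp only [pvSums, List.tail_cons, List.headI, if_pos, BEq.rfl]
      refine congrArg₂ _ (by simp [List.append_assoc]) ?_
      simp only [List.cons.injEq, and_true]
      constructor <;> ring

theorem pv_main (L : List (List Int)) : forceBrute L = forceBrute_alt L := by
  rw [forceBrute_alt, pv_rec_eq, forceBrute, forceBrute_brutus]
  have hcast : ((2 : Int) ^ L.length) = ((2 ^ L.length : Nat) : Int) := by push_cast; ring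
  rw [hcast, PySem.List.pyRange_zero_nat, List.map_map, List.map_map]
  apply List.map_congr_left
  intro k hk
  simp only [Function.comp_apply]
  rw [pv_codeBin_eq, pvBitsL_length]
  have hf := pv_fold_sums (pvBitsL L.length ((k : Nat) : Int)) L 0 0
  rw [pvBitsL_length] at hf
  rw [hf]
  simp

-- ===== VERDICT (by name: the statement is the Claim_ definition above) =====
theorem forceBrute_spec : Claim_equal_forceBrute := by
  intro L _ _
  unfold Spec_forceBrute
  exact pv_main L
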